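-- pv_equiv track=rewrite | github.com/stefperf/google_code_jam | 2021/qualification_round/reversort.py | find_min_pos
-- ===== SOURCE A (Python) =====
-- def find_min_pos(els, beg_pos, end_pos):
--     """
--     Find the position of the min el in els between beg_pos and end_pos included.
--     els are assumed to be always non-empty and distict, with valid beg_pos and end_pos.
--
--     >>> find_min_pos([1], 0, 0)
--     0
--
--     >>> find_min_pos([1, 2], 0, 1)
--     0
--
--     >>> find_min_pos([1, 0], 0, 1)
--     1
--
--     >>> find_min_pos([7, 1], 1, 1)
--     1
--
--     >>> find_min_pos([7, 1, 2], 1, 2)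
--     1
--
--     >>> find_min_pos([7, 1, 0], 1, 2)
--     2
--     """
--     pos, min_pos, min_el = beg_pos, beg_pos, els[beg_pos]
--     while pos < end_pos:
--         pos += 1
--         el = els[pos]
--         if el < min_el:
--             min_pos, min_el = pos, el
--     return min_pos
-- ===== SOURCE B (Python) =====
-- def find_min_pos(els, beg_pos, end_pos):
--     """Two-pass version: first compute the minimum value over the range of
--     positions, then locate the first position holding it."""
--     positions = range(beg_pos, end_pos + 1)
--     min_el = min(els[p] for p in positions)
--     return next(p for p in positions if els[p] == min_el)
-- ===== Notes on version B (the rewrite author's own statement) =====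
-- stated objective: idiomatic
-- what changed: Replaces the single-pass position-and-value tracking loop with two passes over the position range: min() over the elements to get the minimum value, then next() over the same positions to locate the first position holding it.
-- outside the precondition, e.g. on find_min_pos([1, 2], 1, 0): A returns 1, B raises ValueError
import Mathlib
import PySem

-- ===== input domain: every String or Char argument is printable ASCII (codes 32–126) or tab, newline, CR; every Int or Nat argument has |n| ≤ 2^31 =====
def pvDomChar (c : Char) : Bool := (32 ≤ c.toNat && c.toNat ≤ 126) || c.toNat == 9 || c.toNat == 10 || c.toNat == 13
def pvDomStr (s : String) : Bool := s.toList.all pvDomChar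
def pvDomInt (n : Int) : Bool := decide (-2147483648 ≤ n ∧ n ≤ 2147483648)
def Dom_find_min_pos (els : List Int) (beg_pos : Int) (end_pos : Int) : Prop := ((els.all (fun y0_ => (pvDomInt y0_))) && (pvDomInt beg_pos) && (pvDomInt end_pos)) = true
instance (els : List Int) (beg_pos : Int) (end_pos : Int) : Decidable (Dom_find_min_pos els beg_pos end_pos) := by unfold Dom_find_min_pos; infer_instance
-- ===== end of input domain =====

-- B replaces A's single-pass position/value tracking loop with two passes over the
-- position range (min of the elements, then the first position holding it); same cost,
-- more idiomatic.

-- els[p]: Python indexing (negative p wraps); none = IndexError, excluded by Pre_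
def elemAt (els : List Int) (p : Int) : Int := (PySem.List.pyGet? els p).getD 0

-- ===== PORT A =====
-- the 'while pos < end_pos' loop of A; state (pos, min_pos, min_el)
def find_min_pos_loop (els : List Int) (end_pos : Int) (pos min_pos min_el : Int) : Int :=
  if _h : pos < end_pos then
    let pos' := pos + 1
    let el := elemAt els pos'
    if el < min_el then find_min_pos_loop els end_pos pos' pos' el
    else find_min_pos_loop els end_pos pos' min_pos min_el
  else min_pos
termination_by (end_pos - pos).toNat
decreasing_by all_goals omega

def find_min_pos (els : List Int) (beg_pos : Int) (end_pos : Int) : Int :=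
  -- pos, min_pos, min_el = beg_pos, beg_pos, els[beg_pos]
  find_min_pos_loop els end_pos beg_pos beg_pos (elemAt els beg_pos)

-- ===== PORT B =====
def find_min_pos_alt (els : List Int) (beg_pos : Int) (end_pos : Int) : Int :=
  let positions := PySem.List.pyRange beg_pos (end_pos + 1) 1
  -- min(els[p] for p in positions); min() of an empty range raises ValueError, excluded by Pre_
  let min_el := (PySem.List.min? (positions.map (elemAt els)) (fun x => x)).getD 0
  -- next(p for p in positions if els[p] == min_el); exhaustion raises StopIteration, excluded by Pre_
  match positions.find? (fun p => elemAt els p == min_el) with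
  | some p => p
  | none => 0

-- ===== PRECONDITION & SPEC =====
-- Pre_ is the non-empty ranges whose positions are all valid (possibly negative) indices.
-- It excludes inputs where A raises IndexError, and (stated in claim.json "cites") the
-- empty ranges beg_pos > end_pos at a valid beg_pos, on which A returns beg_pos while
-- B's min() of an empty range raises ValueError.
def Pre_find_min_pos (els : List Int) (beg_pos : Int) (end_pos : Int) : Prop :=
  beg_pos ≤ end_pos ∧ -(els.length : Int) ≤ beg_pos ∧ end_pos < (els.length : Int)
instance (els : List Int) (beg_pos : Int) (end_pos : Int) : Decidable (Pre_find_min_pos els beg_pos end_pos) := by unfold Pre_find_min_pos; infer_instance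

def pvWitness_find_min_pos : List Int × Int × Int := ([7, 1, 0], 1, 2)

def Spec_find_min_pos (els : List Int) (beg_pos : Int) (end_pos : Int) (out : Int) : Prop := out = find_min_pos_alt els beg_pos end_pos
instance (els : List Int) (beg_pos : Int) (end_pos : Int) (out : Int) : Decidable (Spec_find_min_pos els beg_pos end_pos out) := by unfold Spec_find_min_pos; infer_instance

-- ===== CLAIM (what is proved, stated in full; the proofs are below) =====
def Claim_equal_find_min_pos : Prop := ∀ (els : List Int) (beg_pos : Int) (end_pos : Int), Dom_find_min_pos els beg_pos end_pos → Pre_find_min_pos els beg_pos end_pos → Spec_find_min_pos els beg_pos end_pos (find_min_pos els beg_pos end_pos)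

-- ===== LEMMAS AND PROOFS =====

-- abstract form of A's loop over the list of values still to scan; the value
-- consed first sits at position i+1
def argminFrom : List Int → Int → Int → Int → Int
  | [], _, mp, _ => mp
  | x :: xs, i, mp, me => if x < me then argminFrom xs (i+1) (i+1) x else argminFrom xs (i+1) mp me

lemma foldl_min_le (t : List Int) (a : Int) : t.foldl min a ≤ a := by
  induction t generalizing a with
  | nil => simp
  | cons y t ih => exact le_trans (ih (min a y)) (min_le_left a y)

lemma foldl_min_mem (t : List Int) (a : Int) : t.foldl min a = a ∨ t.foldl min a ∈ t := by
  induction t generalizing a with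
  | nil => simp
  | cons y t ih =>
    rw [List.foldl_cons]
    rcases ih (min a y) with h | h
    · rcases le_total a y with hy | hy
      · left; rw [h, min_eq_left hy]
      · right; rw [h, min_eq_right hy]; exact List.mem_cons_self
    · right; exact List.mem_cons_of_mem _ h

-- invariant of A's loop on the abstract value list
lemma argminFrom_eq (t : List Int) : ∀ (i mp me : Int),
    argminFrom t i mp me =
      if t.foldl min me < me then i + 1 + (t.idxOf (t.foldl min me) : Int) else mp := by
  induction t with
  | nil => intro i mp me; simp [argminFrom]
  | cons y t ih =>
    intro i mp me
    by_cases hy : y < me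
    · have hM : (y :: t).foldl min me = t.foldl min y := by
        simp [List.foldl_cons, min_eq_right hy.le]
      rw [show argminFrom (y :: t) i mp me = argminFrom t (i+1) (i+1) y by simp [argminFrom, hy]]
      rw [ih (i+1) (i+1) y, hM]
      by_cases hlt : t.foldl min y < y
      · have hne : t.foldl min y ≠ y := ne_of_lt hlt
        have hidx : (y :: t).idxOf (t.foldl min y) = t.idxOf (t.foldl min y) + 1 := by
          simp [hne.symm]
        rw [if_pos hlt, if_pos (lt_trans hlt hy), hidx]
        push_cast; ring
      · have hEq : t.foldl min y = y := le_antisymm (foldl_min_le t y) (not_lt.mp hlt)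
        rw [if_neg hlt, if_pos (by rw [hEq]; exact hy), hEq]
        simp
    · have hM : (y :: t).foldl min me = t.foldl min me := by
        simp [List.foldl_cons, min_eq_left (not_lt.mp hy)]
      rw [show argminFrom (y :: t) i mp me = argminFrom t (i+1) mp me by simp [argminFrom, hy]]
      rw [ih (i+1) mp me, hM]
      by_cases hlt : t.foldl min me < me
      · have hne : t.foldl min me ≠ y := ne_of_lt (lt_of_lt_of_le hlt (not_lt.mp hy))
        have hidx : (y :: t).idxOf (t.foldl min me) = t.idxOf (t.foldl min me) + 1 := by
          simp [hne.symm]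
        rw [if_pos hlt, if_pos hlt, hidx]
        push_cast; ring
      · rw [if_neg hlt, if_neg hlt]

-- A's loop equals argminFrom over the values at the positions still to scan
lemma loop_eq_argminFrom (els : List Int) (e : Int) (pos mp me : Int) :
    find_min_pos_loop els e pos mp me =
      argminFrom ((PySem.List.pyRange (pos + 1) (e + 1) 1).map (elemAt els)) pos mp me := by
  by_cases h : pos < e
  · have hstep : find_min_pos_loop els e pos mp me =
        (if elemAt els (pos+1) < me
          then find_min_pos_loop els e (pos+1) (pos+1) (elemAt els (pos+1))
          else find_min_pos_loop els e (pos+1) mp me) := by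
      rw [find_min_pos_loop]; simp only [dif_pos h]
    rw [hstep, PySem.List.pyRange_one_cons (by omega : pos + 1 < e + 1), List.map_cons,
        argminFrom]
    by_cases hel : elemAt els (pos+1) < me
    · rw [if_pos hel, if_pos hel, loop_eq_argminFrom els e (pos+1) (pos+1) _]
    · rw [if_neg hel, if_neg hel, loop_eq_argminFrom els e (pos+1) mp me]
  · rw [find_min_pos_loop, dif_neg h,
        PySem.List.pyRange_one_eq_nil (by omega : e + 1 ≤ pos + 1)]
    rfl
termination_by (e - pos).toNat
decreasing_by all_goals omega

-- B's locating pass: the first position in the range holding value M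
lemma find?_pyRange_eq (els : List Int) (M : Int) (a b : Int)
    (h : M ∈ (PySem.List.pyRange a b 1).map (elemAt els)) :
    (PySem.List.pyRange a b 1).find? (fun p => elemAt els p == M) =
      some (a + (((PySem.List.pyRange a b 1).map (elemAt els)).idxOf M : Int)) := by
  have hab : a < b := by
    by_contra hc
    rw [PySem.List.pyRange_one_eq_nil (by omega)] at h
    simp at h
  rw [PySem.List.pyRange_one_cons hab] at h ⊢
  rw [List.map_cons] at h ⊢
  by_cases hx : elemAt els a = M
  · rw [List.find?_cons_of_pos (by simpa using hx), hx]
    simp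
  · have hmem : M ∈ (PySem.List.pyRange (a + 1) b 1).map (elemAt els) := by
      rcases List.mem_cons.mp h with h' | h'
      · exact absurd h'.symm hx
      · exact h'
    rw [List.find?_cons_of_neg (by simpa using hx),
        find?_pyRange_eq els M (a + 1) b hmem]
    have hidx : (elemAt els a :: (PySem.List.pyRange (a + 1) b 1).map (elemAt els)).idxOf M =
        ((PySem.List.pyRange (a + 1) b 1).map (elemAt els)).idxOf M + 1 := by
      simp [hx]
    rw [hidx]
    push_cast; ring_nf
termination_by (b - a).toNat
decreasing_by omega

-- ===== VERDICT (by name: the statement is the Claim_ definition above) =====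
theorem find_min_pos_spec : Claim_equal_find_min_pos := by
  intro els b e _hdom hpre
  obtain ⟨hbe, _hlo, _hhi⟩ := hpre
  unfold Spec_find_min_pos
  rw [find_min_pos, loop_eq_argminFrom els e b b _, argminFrom_eq]
  simp only [find_min_pos_alt]
  rw [PySem.List.pyRange_one_cons (by omega : b < e + 1), List.map_cons,
      PySem.List.min?_id_cons, Option.getD_some]
  set vs := (PySem.List.pyRange (b + 1) (e + 1) 1).map (elemAt els) with hvs
  by_cases hM : vs.foldl min (elemAt els b) < elemAt els b
  · have hne : elemAt els b ≠ vs.foldl min (elemAt els b) := (ne_of_lt hM).symm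
    have hmem : vs.foldl min (elemAt els b) ∈ vs := by
      rcases foldl_min_mem vs (elemAt els b) with h' | h'
      · rw [h'] at hM; exact absurd hM (lt_irrefl _)
      · exact h'
    rw [if_pos hM, List.find?_cons_of_neg (by simpa using hne),
        find?_pyRange_eq els _ (b + 1) (e + 1) hmem]
  · have hEq : vs.foldl min (elemAt els b) = elemAt els b :=
      le_antisymm (foldl_min_le vs (elemAt els b)) (not_lt.mp hM)
    rw [if_neg hM, List.find?_cons_of_pos (by simp [hEq])]
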